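-- pv_equiv track=rewrite | github.com/sh95fit/CodingTest | 백준/Gold/1081. 합/합.py | digit_sum_upto
-- ===== SOURCE A (Python) =====
-- def digit_sum_upto(n):
--
--     if n == 0:
--
--         return 0
--
--     result = 0
--
--     current = 0
--
--     place = 1
--
--     while n // place > 0:
--
--         lower_digits = n - (n // place) * place
--
--         current_digit = (n // place) % 10
--
--         higher_digits = n // (place * 10)
--
--         result += higher_digits * place * 45
--
--         result += current_digit * (current_digit - 1) // 2 * place
--
--         result += current_digit * (lower_digits + 1)
--
--         place *= 10
--
--     return result
-- ===== SOURCE B (Python) =====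
-- def digit_sum_upto(n):
--     if n < 0:
--         return 0
--     q, r = divmod(n, 10)
--     low = r * (r + 1) // 2
--     if q == 0:
--         return low
--     s = 0
--     m = q
--     while m > 0:
--         s += m % 10
--         m //= 10
--     return 45 * q + 10 * digit_sum_upto(q - 1) + low + (r + 1) * s
-- ===== Notes on version B (the rewrite author's own statement) =====
-- stated objective: alternative
-- what changed: Replaced A's iterative loop over digit places (a closed-form count per place) by a recursion that strips the last digit: the triangular number of the remainder plus a recursive call on the quotient minus one plus the quotient's digit sum, weighted per the recurrence.
import Mathlib
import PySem

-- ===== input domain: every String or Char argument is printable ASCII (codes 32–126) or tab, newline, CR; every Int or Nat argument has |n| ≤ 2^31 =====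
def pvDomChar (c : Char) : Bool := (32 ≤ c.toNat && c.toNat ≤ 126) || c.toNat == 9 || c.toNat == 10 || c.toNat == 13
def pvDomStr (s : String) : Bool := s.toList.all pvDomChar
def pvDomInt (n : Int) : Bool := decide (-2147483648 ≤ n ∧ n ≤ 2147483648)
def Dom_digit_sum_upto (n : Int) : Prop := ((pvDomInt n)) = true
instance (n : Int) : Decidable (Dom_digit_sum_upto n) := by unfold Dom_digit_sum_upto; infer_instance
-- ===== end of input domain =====

-- B replaces A's iterative per-place closed-form arithmetic by a strip-the-last-digit
-- recursion (triangular number of the remainder + recursive call on the quotient minus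
-- one + the quotient's digit sum, suitably weighted); objective: alternative.

-- ===== PORT A =====
-- A's while loop, with fuel as a totality guard only (n.toNat + 1 iterations are
-- provably enough: place is multiplied by 10 each round and the loop stops once
-- place > n).  A's dead variable 'current = 0' is never read and is omitted.
def digit_sum_upto_loop (n : Int) (fuel : Nat) (result place : Int) : Int :=
  match fuel with
  | 0 => result
  | fuel + 1 =>
    if PySem.Int.floordiv n place > 0 then
      let lower_digits := n - (PySem.Int.floordiv n place) * place
      let current_digit := PySem.Int.mod (PySem.Int.floordiv n place) 10
      let higher_digits := PySem.Int.floordiv n (place * 10)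
      digit_sum_upto_loop n fuel
        (result + higher_digits * place * 45
                + PySem.Int.floordiv (current_digit * (current_digit - 1)) 2 * place
                + current_digit * (lower_digits + 1))
        (place * 10)
    else result

def digit_sum_upto (n : Int) : Int :=
  if n = 0 then 0
  else digit_sum_upto_loop n (n.toNat + 1) 0 1

-- ===== PORT B =====
-- inner 'while m > 0: s += m % 10; m //= 10' of Source B (s is the accumulator)
def addDigits (total j : Int) : Int :=
  if _h : j > 0 then addDigits (total + PySem.Int.mod j 10) (PySem.Int.floordiv j 10)
  else total
termination_by j.toNat
decreasing_by
  rw [PySem.Int.floordiv_eq_ediv_of_pos (by norm_num : (0:Int) < 10)]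
  omega

def digit_sum_upto_alt (n : Int) : Int :=
  if _h : n < 0 then 0
  else
    let q := PySem.Int.floordiv n 10
    let r := PySem.Int.mod n 10
    let low := PySem.Int.floordiv (r * (r + 1)) 2
    if _hq : q = 0 then low
    else 45 * q + 10 * digit_sum_upto_alt (q - 1) + low + (r + 1) * addDigits 0 q
termination_by n.toNat
decreasing_by
  have hq' : ¬ PySem.Int.floordiv n 10 = 0 := _hq
  rw [PySem.Int.floordiv_eq_ediv_of_pos (by norm_num : (0:Int) < 10)] at hq' ⊢
  omega

-- ===== PRECONDITION & SPEC =====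
def Spec_digit_sum_upto (n : Int) (out : Int) : Prop := out = digit_sum_upto_alt n
instance (n : Int) (out : Int) : Decidable (Spec_digit_sum_upto n out) := by unfold Spec_digit_sum_upto; infer_instance

-- ===== CLAIM (what is proved, stated in full; the proofs are below) =====
def Claim_equal_digit_sum_upto : Prop := ∀ (n : Int), Dom_digit_sum_upto n → Spec_digit_sum_upto n (digit_sum_upto n)

-- ===== LEMMAS AND PROOFS =====

-- mathematical digit sum on Nat
def dsN (m : Nat) : Nat :=
  if h : m = 0 then 0 else m % 10 + dsN (m / 10)
termination_by m
decreasing_by omega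

lemma dsN_eq (m : Nat) : dsN m = m % 10 + dsN (m / 10) := by
  rw [dsN]
  split
  · subst ‹m = 0›; rw [dsN]; simp
  · rfl

lemma dsN_zero : dsN 0 = 0 := by rw [dsN]; simp

-- partial sums of the last digit
lemma sum_mod10 (m : Nat) :
    ∑ v ∈ Finset.range m, v % 10 = m / 10 * 45 + (m % 10) * (m % 10 - 1) / 2 := by
  induction m with
  | zero => simp
  | succ m ih =>
    rw [Finset.sum_range_succ, ih]
    obtain ⟨q, r, hr, rfl⟩ : ∃ q r, r < 10 ∧ m = 10 * q + r :=
      ⟨m / 10, m % 10, by omega, by omega⟩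
    interval_cases r <;>
      · simp only [Nat.add_assoc, show ∀ b c : Nat, (10*b+c)%10 = c%10 from fun b c => Nat.mul_add_mod 10 b c,
                 Nat.mul_add_div (by norm_num : 0 < 10)] <;> omega

-- grouping: i/p is constant on blocks of length p
lemma sum_div_group_aux (f : Nat → Nat) (p : Nat) (hp : 0 < p) :
    ∀ q r, r ≤ p → ∑ i ∈ Finset.range (p * q + r), f (i / p)
      = p * (∑ v ∈ Finset.range q, f v) + r * f q := by
  intro q
  induction q with
  | zero =>
    intro r
    induction r with
    | zero => intro _; simp
    | succ r ihr =>
      intro hr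
      rw [show p * 0 + (r + 1) = (p * 0 + r) + 1 by ring, Finset.sum_range_succ,
          ihr (by omega), Nat.div_eq_of_lt (by omega)]
      ring
  | succ q ihq =>
    intro r
    induction r with
    | zero =>
      intro _
      rw [show p * (q + 1) + 0 = p * q + p by ring, ihq p le_rfl, Finset.sum_range_succ]
      ring
    | succ r ihr =>
      intro hr
      rw [show p * (q + 1) + (r + 1) = (p * (q + 1) + r) + 1 by ring, Finset.sum_range_succ,
          ihr (by omega), Nat.mul_add_div hp, Nat.div_eq_of_lt (by omega : r < p)]
      ring

lemma sum_div_group (f : Nat → Nat) (p : Nat) (hp : 0 < p) (n : Nat) :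
    ∑ i ∈ Finset.range (n + 1), f (i / p)
      = p * (∑ v ∈ Finset.range (n / p), f v) + (n % p + 1) * f (n / p) := by
  have h := Nat.div_add_mod n p
  have hlt : n % p < p := Nat.mod_lt _ hp
  have hsplit : n + 1 = p * (n / p) + (n % p + 1) := by
    rw [← Nat.add_assoc, h]
  rw [hsplit]
  exact sum_div_group_aux f p hp (n / p) (n % p + 1) (by omega)

-- one round of A's loop, over Nat
lemma step_identity (p : Nat) (hp : 0 < p) (n : Nat) :
    ∑ i ∈ Finset.range (n + 1), dsN (i / p)
      = n / (p * 10) * p * 45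
        + (n / p % 10) * (n / p % 10 - 1) / 2 * p
        + (n / p % 10) * (n % p + 1)
        + ∑ i ∈ Finset.range (n + 1), dsN (i / (p * 10)) := by
  have key : ∀ i : Nat, dsN (i / p) = i / p % 10 + dsN (i / (p * 10)) := by
    intro i
    rw [dsN_eq (i / p), Nat.div_div_eq_div_mul]
  calc ∑ i ∈ Finset.range (n + 1), dsN (i / p)
      = ∑ i ∈ Finset.range (n + 1), (i / p % 10 + dsN (i / (p * 10))) := by
        exact Finset.sum_congr rfl (fun i _ => key i)
    _ = (∑ i ∈ Finset.range (n + 1), i / p % 10)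
        + ∑ i ∈ Finset.range (n + 1), dsN (i / (p * 10)) := Finset.sum_add_distrib
    _ = _ := by
        rw [sum_div_group (fun v => v % 10) p hp n, sum_mod10, Nat.div_div_eq_div_mul]
        ring

lemma sum_base (p n : Nat) (h : n < p) :
    ∑ i ∈ Finset.range (n + 1), dsN (i / p) = 0 := by
  apply Finset.sum_eq_zero
  intro i hi
  simp only [Finset.mem_range] at hi
  rw [Nat.div_eq_of_lt (by omega), dsN_zero]

-- A's loop computes the running sum of digits at positions ≥ k
lemma loop_eq (fuel : Nat) : ∀ (k : Nat) (n : Nat) (result : Int),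
    n < 10 ^ k * 10 ^ fuel →
    digit_sum_upto_loop (n : Int) fuel result ((10 ^ k : Nat) : Int)
      = result + ((∑ i ∈ Finset.range (n + 1), dsN (i / 10 ^ k) : Nat) : Int) := by
  induction fuel with
  | zero =>
    intro k n result hb
    rw [digit_sum_upto_loop, sum_base (10 ^ k) n (by simpa using hb)]
    simp
  | succ fuel ih =>
    intro k n result hb
    have hP : 0 < 10 ^ k := Nat.pow_pos (by norm_num)
    rw [digit_sum_upto_loop]
    by_cases hg : 10 ^ k ≤ n
    · have hdiv : PySem.Int.floordiv (n : Int) ((10 ^ k : Nat) : Int)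
          = ((n / 10 ^ k : Nat) : Int) := PySem.Int.floordiv_natCast n (10 ^ k)
      rw [if_pos (by rw [hdiv]; exact_mod_cast Nat.div_pos hg hP)]
      simp only [hdiv]
      have hlower : (n : Int) - ((n / 10 ^ k : Nat) : Int) * ((10 ^ k : Nat) : Int)
          = ((n % 10 ^ k : Nat) : Int) := by
        have h := Nat.div_add_mod n (10 ^ k)
        have h' : ((10 ^ k : Nat) : Int) * ((n / 10 ^ k : Nat) : Int)
            + ((n % 10 ^ k : Nat) : Int) = (n : Int) := by exact_mod_cast h
        linarith [h']
      have hmod : PySem.Int.mod ((n / 10 ^ k : Nat) : Int) 10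
          = ((n / 10 ^ k % 10 : Nat) : Int) := by
        exact_mod_cast PySem.Int.mod_natCast (n / 10 ^ k) 10
      have htri : PySem.Int.floordiv (((n / 10 ^ k % 10 : Nat) : Int)
            * (((n / 10 ^ k % 10 : Nat) : Int) - 1)) 2
          = ((n / 10 ^ k % 10 * (n / 10 ^ k % 10 - 1) / 2 : Nat) : Int) := by
        have hcast : (((n / 10 ^ k % 10 : Nat) : Int) * (((n / 10 ^ k % 10 : Nat) : Int) - 1))
            = ((n / 10 ^ k % 10 * (n / 10 ^ k % 10 - 1) : Nat) : Int) := by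
          cases he : n / 10 ^ k % 10 with
          | zero => simp
          | succ m => push_cast [Nat.succ_sub_one]; ring
        rw [hcast]
        exact_mod_cast PySem.Int.floordiv_natCast (n / 10 ^ k % 10 * (n / 10 ^ k % 10 - 1)) 2
      have hhigh : PySem.Int.floordiv (n : Int) (((10 ^ k : Nat) : Int) * 10)
          = ((n / (10 ^ k * 10) : Nat) : Int) := by
        rw [show ((10 ^ k : Nat) : Int) * 10 = ((10 ^ k * 10 : Nat) : Int) by push_cast; ring]
        exact PySem.Int.floordiv_natCast n (10 ^ k * 10)
      simp only [hlower, hmod, htri, hhigh]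
      rw [show ((10 ^ k : Nat) : Int) * 10 = ((10 ^ (k + 1) : Nat) : Int) by push_cast; ring]
      rw [ih (k + 1) n _ (by rw [show (10:Nat) ^ (k + 1) * 10 ^ fuel = 10 ^ k * 10 ^ (fuel + 1) by ring]; exact hb)]
      rw [show (∑ i ∈ Finset.range (n + 1), dsN (i / 10 ^ k))
            = n / (10 ^ k * 10) * 10 ^ k * 45
              + n / 10 ^ k % 10 * (n / 10 ^ k % 10 - 1) / 2 * 10 ^ k
              + n / 10 ^ k % 10 * (n % 10 ^ k + 1)
              + ∑ i ∈ Finset.range (n + 1), dsN (i / (10 ^ k * 10))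
          from step_identity (10 ^ k) hP n]
      rw [show (10:Nat) ^ (k + 1) = 10 ^ k * 10 by ring]
      push_cast
      ring
    · rw [if_neg (by
        rw [PySem.Int.floordiv_natCast n (10 ^ k)]
        rw [Nat.div_eq_of_lt (by omega)]
        norm_num)]
      rw [sum_base (10 ^ k) n (by omega)]
      simp

-- the B side: the inner loop is the digit sum
lemma addDigits_eq (j : Nat) : ∀ (total : Int),
    addDigits total (j : Int) = total + (dsN j : Int) := by
  induction j using Nat.strong_induction_on with
  | _ j ih =>
    intro total
    rw [addDigits]
    by_cases h : 0 < j
    · rw [dif_pos (by exact_mod_cast h)]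
      rw [show PySem.Int.mod (j : Int) 10 = ((j % 10 : Nat) : Int) from by
            exact_mod_cast PySem.Int.mod_natCast j 10,
          show PySem.Int.floordiv (j : Int) 10 = ((j / 10 : Nat) : Int) from by
            exact_mod_cast PySem.Int.floordiv_natCast j 10,
          ih (j / 10) (by omega), dsN_eq j]
      push_cast
      ring
    · rw [dif_neg (by exact_mod_cast h)]
      have : j = 0 := by omega
      subst this
      rw [dsN_zero]
      simp

lemma sum_mod10_incl (m : Nat) :
    ∑ i ∈ Finset.range (m + 1), i % 10 = m / 10 * 45 + m % 10 * (m % 10 + 1) / 2 := by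
  rw [sum_mod10 (m + 1)]
  obtain ⟨q, r, hr, rfl⟩ : ∃ q r, r < 10 ∧ m = 10 * q + r :=
    ⟨m / 10, m % 10, by omega, by omega⟩
  interval_cases r <;>
    · simp only [Nat.add_assoc, show ∀ b c : Nat, (10*b+c)%10 = c%10 from fun b c => Nat.mul_add_mod 10 b c,
                 Nat.mul_add_div (by norm_num : 0 < 10)] <;> omega

-- B's recurrence, over Nat
lemma sum_dsN_rec (m : Nat) (hq : 1 ≤ m / 10) :
    ∑ i ∈ Finset.range (m + 1), dsN i
      = 45 * (m / 10) + 10 * ∑ i ∈ Finset.range ((m / 10 - 1) + 1), dsN i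
        + m % 10 * (m % 10 + 1) / 2 + (m % 10 + 1) * dsN (m / 10) := by
  rw [show (m / 10 - 1) + 1 = m / 10 by omega]
  calc ∑ i ∈ Finset.range (m + 1), dsN i
      = ∑ i ∈ Finset.range (m + 1), (i % 10 + dsN (i / 10)) :=
        Finset.sum_congr rfl (fun i _ => dsN_eq i)
    _ = (∑ i ∈ Finset.range (m + 1), i % 10)
        + ∑ i ∈ Finset.range (m + 1), dsN (i / 10) := Finset.sum_add_distrib
    _ = _ := by
        rw [sum_mod10_incl m, sum_div_group dsN 10 (by norm_num) m]
        ring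

-- small case: below 10 every dsN i is i
lemma sum_dsN_small (m : Nat) (hm : m < 10) :
    ∑ i ∈ Finset.range (m + 1), dsN i = m * (m + 1) / 2 := by
  have h1 : ∀ i ∈ Finset.range (m + 1), dsN i = i := by
    intro i hi
    simp only [Finset.mem_range] at hi
    rw [dsN_eq, Nat.div_eq_of_lt (by omega), dsN_zero, Nat.mod_eq_of_lt (by omega)]
    omega
  rw [Finset.sum_congr rfl h1]
  have h3 : (∑ i ∈ Finset.range (m + 1), i) * 2 = m * (m + 1) := by
    rw [Finset.sum_range_id_mul_two, Nat.add_sub_cancel]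
    ring
  omega

-- B computes the sum of digit sums
lemma alt_eq (m : Nat) :
    digit_sum_upto_alt (m : Int) = ((∑ i ∈ Finset.range (m + 1), dsN i : Nat) : Int) := by
  induction m using Nat.strong_induction_on with
  | _ m ih =>
    rw [digit_sum_upto_alt.eq_def, dif_neg (by omega : ¬ ((m : Nat) : Int) < 0)]
    have hq : PySem.Int.floordiv ((m : Nat) : Int) 10 = ((m / 10 : Nat) : Int) := by
      exact_mod_cast PySem.Int.floordiv_natCast m 10
    have hr : PySem.Int.mod ((m : Nat) : Int) 10 = ((m % 10 : Nat) : Int) := by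
      exact_mod_cast PySem.Int.mod_natCast m 10
    have hlow : PySem.Int.floordiv (((m % 10 : Nat) : Int) * (((m % 10 : Nat) : Int) + 1)) 2
        = ((m % 10 * (m % 10 + 1) / 2 : Nat) : Int) := by
      rw [show ((m % 10 : Nat) : Int) * (((m % 10 : Nat) : Int) + 1)
            = ((m % 10 * (m % 10 + 1) : Nat) : Int) by push_cast; ring]
      exact_mod_cast PySem.Int.floordiv_natCast (m % 10 * (m % 10 + 1)) 2
    simp only [hq, hr, hlow]
    by_cases h0 : m / 10 = 0
    · rw [dif_pos (by exact_mod_cast h0)]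
      rw [Nat.mod_eq_of_lt (by omega : m < 10), sum_dsN_small m (by omega)]
    · rw [dif_neg (by exact_mod_cast h0)]
      rw [show ((m / 10 : Nat) : Int) - 1 = ((m / 10 - 1 : Nat) : Int) by omega,
          ih (m / 10 - 1) (by omega), addDigits_eq (m / 10) 0,
          sum_dsN_rec m (by omega)]
      push_cast
      ring

-- ===== VERDICT (by name: the statement is the Claim_ definition above) =====
theorem digit_sum_upto_spec : Claim_equal_digit_sum_upto := by
  intro n _
  show digit_sum_upto n = digit_sum_upto_alt n
  rcases lt_trichotomy n 0 with hneg | rfl | hpos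
  · rw [digit_sum_upto, if_neg (by omega),
        show n.toNat + 1 = 1 from by omega,
        digit_sum_upto_loop]
    rw [if_neg (by
      rw [PySem.Int.floordiv_eq_ediv_of_pos (by norm_num : (0:Int) < 1)]
      omega)]
    rw [digit_sum_upto_alt.eq_def, dif_pos hneg]
  · rw [digit_sum_upto, if_pos rfl,
        show (0 : Int) = ((0 : Nat) : Int) from rfl, alt_eq 0,
        Finset.sum_range_one, dsN_zero]
  · rw [digit_sum_upto, if_neg (by omega)]
    have hcast : ((n.toNat : Nat) : Int) = n := Int.toNat_of_nonneg (by omega)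
    have hb : n.toNat < 10 ^ 0 * 10 ^ (n.toNat + 1) := by
      have h1 : n.toNat < 10 ^ n.toNat := Nat.lt_pow_self (by norm_num)
      have h2 : (10:Nat) ^ n.toNat ≤ 10 ^ (n.toNat + 1) := Nat.pow_le_pow_right (by norm_num) (by omega)
      omega
    have hA := loop_eq (n.toNat + 1) 0 n.toNat 0 hb
    rw [hcast, show ((10 ^ 0 : Nat) : Int) = 1 from by norm_num] at hA
    rw [hA, ← hcast, alt_eq n.toNat]
    simp only [pow_zero, Nat.div_one, zero_add, Int.toNat_natCast]
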